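-- pv_equiv track=rewrite | github.com/ClayRitterson/Custom-Cipher | CustomCipher2.py | countBodies
-- ===== SOURCE A (Python) =====
-- def countBodies(trueList, pos):
--     numBodies = 0
--     trueFound = 0
--     x = 0
--     while trueFound < pos:
--         checkBody = trueList[x]
--         if checkBody == 0:
--             numBodies += 1
--         elif checkBody != 0:
--             trueFound += 1
--         x += 1
--     return x - 1
-- ===== SOURCE B (Python) =====
-- def countBodies(trueList, pos):
--     if pos <= 0:
--         return -1
--     indices = [i for i, v in enumerate(trueList) if v != 0]
--     return indices[pos - 1]
-- ===== Notes on version B (the rewrite author's own statement) =====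
-- stated objective: simpler
-- what changed: Replaces the fused early-stopping while-loop with three counters by a build-table-then-select decomposition: collect the indices of nonzero elements once, then index the pos-th one.
import Mathlib
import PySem

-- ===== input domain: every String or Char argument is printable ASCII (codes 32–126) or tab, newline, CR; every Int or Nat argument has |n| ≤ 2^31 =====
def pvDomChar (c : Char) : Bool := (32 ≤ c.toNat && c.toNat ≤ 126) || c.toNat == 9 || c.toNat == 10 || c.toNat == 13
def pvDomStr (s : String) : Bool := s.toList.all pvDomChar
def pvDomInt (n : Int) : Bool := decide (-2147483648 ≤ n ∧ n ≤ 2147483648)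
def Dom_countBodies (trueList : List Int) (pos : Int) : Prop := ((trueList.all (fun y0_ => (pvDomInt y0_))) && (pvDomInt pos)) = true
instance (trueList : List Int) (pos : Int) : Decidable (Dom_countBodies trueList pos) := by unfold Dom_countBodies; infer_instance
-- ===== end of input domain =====

-- B replaces A's fused early-stopping while-loop by collecting all nonzero indices once and selecting the pos-th (simpler decomposition; return value equivalence).


-- ===== PORT A =====
-- while trueFound < pos: … ; fuel = trueList.length is enough steps inside Pre_;
-- the 0 returned on fuel exhaustion / pyGet? none is Python's IndexError, excluded by Pre_.
def countBodiesLoop (trueList : List Int) (pos trueFound numBodies x : Int) (fuel : Nat) : Int :=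
  if trueFound < pos then
    match fuel, PySem.List.pyGet? trueList x with
    | 0, _ => 0
    | _ + 1, none => 0
    | fuel' + 1, some checkBody =>
      if checkBody = 0 then
        countBodiesLoop trueList pos trueFound (numBodies + 1) (x + 1) fuel'
      else
        countBodiesLoop trueList pos (trueFound + 1) numBodies (x + 1) fuel'
  else
    x - 1
termination_by fuel

def countBodies (trueList : List Int) (pos : Int) : Int :=
  countBodiesLoop trueList pos 0 0 0 trueList.length

-- ===== PORT B =====
def countBodies_alt (trueList : List Int) (pos : Int) : Int :=
  if pos ≤ 0 then -1
  else
    let indices := ((PySem.List.enumerate trueList 0).filter (fun p => p.2 != 0)).map (fun p => p.1)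
    (PySem.List.pyGet? indices (pos - 1)).getD 0  -- in range under Pre_; none = IndexError, excluded

-- ===== PRECONDITION & SPEC =====
-- Pre_ excludes exactly the inputs where A (and B) raise IndexError: 0 < pos but fewer than pos nonzero elements.
def Pre_countBodies (trueList : List Int) (pos : Int) : Prop :=
  pos ≤ 0 ∨ pos ≤ (trueList.countP (fun v => v != 0) : Int)
instance (trueList : List Int) (pos : Int) : Decidable (Pre_countBodies trueList pos) := by unfold Pre_countBodies; infer_instance
def pvWitness_countBodies : List Int × Int := ([1, 0, 2], 2)
def Spec_countBodies (trueList : List Int) (pos : Int) (out : Int) : Prop := out = countBodies_alt trueList pos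
instance (trueList : List Int) (pos : Int) (out : Int) : Decidable (Spec_countBodies trueList pos out) := by unfold Spec_countBodies; infer_instance

-- ===== CLAIM (what is proved, stated in full; the proofs are below) =====
def Claim_equal_countBodies : Prop := ∀ (trueList : List Int) (pos : Int), Dom_countBodies trueList pos → Pre_countBodies trueList pos → Spec_countBodies trueList pos (countBodies trueList pos)

-- ===== LEMMAS AND PROOFS =====

-- index (0-based) of the k-th (1-based) nonzero element
def nthNZ : List Int → Int → Option Nat
  | [], _ => none
  | a :: l, k =>
    if a ≠ 0 then
      if k ≤ 1 then some 0 else (nthNZ l (k - 1)).map (· + 1)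
    else
      (nthNZ l k).map (· + 1)

lemma nthNZ_isSome : ∀ (l : List Int) (k : Int), 1 ≤ k →
    k ≤ (l.countP (fun v => v != 0) : Int) → (nthNZ l k).isSome := by
  intro l
  induction l with
  | nil => intro k h1 h2; simp at h2; omega
  | cons a l ih =>
    intro k h1 h2
    rw [List.countP_cons] at h2
    by_cases ha : a = 0
    · simp [nthNZ, ha]
      have := ih k h1 (by simp [ha] at h2; exact_mod_cast h2)
      cases h : nthNZ l k <;> simp_all
    · by_cases hk : k ≤ 1
      · simp [nthNZ, ha, hk]
      · simp only [nthNZ, if_pos ha, if_neg hk]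
        have := ih (k - 1) (by omega) (by simp [ha] at h2; omega)
        cases h : nthNZ l (k - 1) <;> simp_all

lemma loopA (l : List Int) (pos : Int) :
    ∀ (fuel x : Nat) (tf nb : Int), l.length - x ≤ fuel →
    pos ≤ tf + (((l.drop x).countP (fun v => v != 0) : Nat) : Int) →
    countBodiesLoop l pos tf nb (x : Int) fuel =
      if tf < pos then
        (x : Int) + (((nthNZ (l.drop x) (pos - tf)).getD 0 : Nat) : Int)
      else (x : Int) - 1 := by
  intro fuel
  induction fuel with
  | zero =>
    intro x tf nb hf hc
    have hd : l.drop x = [] := List.drop_eq_nil_of_le (by omega)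
    rw [hd] at hc; simp at hc
    rw [countBodiesLoop.eq_def]
    simp [show ¬ tf < pos by omega]
  | succ f ih =>
    intro x tf nb hf hc
    by_cases htf : tf < pos
    · have hx : x < l.length := by
        by_contra h
        rw [List.drop_eq_nil_of_le (by omega)] at hc
        simp at hc; omega
      have hdrop : l.drop x = l[x] :: l.drop (x + 1) := List.drop_eq_getElem_cons hx
      have hcnt := hc
      rw [hdrop, List.countP_cons] at hcnt
      rw [countBodiesLoop.eq_def]
      simp only [htf, if_true, PySem.List.pyGet?_natCast, List.getElem?_eq_getElem hx]
      by_cases h0 : l[x] = 0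
      · simp only [h0]
        have hc' : pos ≤ tf + (((l.drop (x+1)).countP (fun v => v != 0) : Nat) : Int) := by
          simp [h0] at hcnt; exact_mod_cast hcnt
        have := ih (x + 1) tf (nb + 1) (by omega) hc'
        push_cast at this
        rw [this]
        simp only [htf, if_true, hdrop, nthNZ, h0, if_neg (by simp : ¬ (0:Int) ≠ 0)]
        obtain ⟨i, hi⟩ := Option.isSome_iff_exists.mp
          (nthNZ_isSome (l.drop (x+1)) (pos - tf) (by omega) (by omega))
        rw [hi]
        simp; ring
      · simp only [if_neg h0]
        have hcnt' : pos ≤ tf + 1 + (((l.drop (x+1)).countP (fun v => v != 0) : Nat) : Int) := by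
          simp [h0] at hcnt; omega
        have := ih (x + 1) (tf + 1) nb (by omega) hcnt'
        push_cast at this
        rw [this]
        by_cases htf1 : tf + 1 < pos
        · simp only [if_true, htf1, hdrop, nthNZ, if_pos h0,
            if_neg (show ¬ pos - tf ≤ 1 by omega)]
          obtain ⟨i, hi⟩ := Option.isSome_iff_exists.mp
            (nthNZ_isSome (l.drop (x+1)) (pos - tf - 1) (by omega) (by omega))
          rw [show pos - (tf + 1) = pos - tf - 1 by ring, hi]
          simp; ring
        · simp only [htf1, if_false, hdrop, nthNZ, if_pos h0,
            if_pos (show pos - tf ≤ 1 by omega)]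
          simp
    · rw [countBodiesLoop.eq_def]
      simp [htf]

lemma idxsB (l : List Int) :
    ∀ (pos s : Int), 1 ≤ pos → pos ≤ (l.countP (fun v => v != 0) : Int) →
    PySem.List.pyGet? (((PySem.List.enumerate l s).filter (fun p => p.2 != 0)).map (fun p => p.1)) (pos - 1)
      = (nthNZ l pos).map (fun i => s + (i : Int)) := by
  induction l with
  | nil => intro pos s h1 h2; simp at h2; omega
  | cons a l ih =>
    intro pos s h1 h2
    rw [List.countP_cons] at h2
    rw [PySem.List.enumerate_cons]
    by_cases ha : a = 0
    · have h2' : pos ≤ (l.countP (fun v => v != 0) : Int) := by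
        simp [ha] at h2; exact_mod_cast h2
      rw [List.filter_cons_of_neg (by simp [ha])]
      rw [ih pos (s + 1) h1 h2']
      simp only [nthNZ, if_neg (by simp [ha] : ¬ a ≠ 0)]
      cases h : nthNZ l pos <;> simp <;> ring
    · rw [List.filter_cons_of_pos (by simpa using ha)]
      by_cases hk : pos ≤ 1
      · have : pos = 1 := by omega
        subst this
        simp [nthNZ, ha]
      · have h2' : pos - 1 ≤ (l.countP (fun v => v != 0) : Int) := by
          simp [ha] at h2; omega
        rw [List.map_cons, PySem.List.pyGet?_of_nonneg _ (show (0:Int) ≤ pos - 1 by omega)]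
        rw [show (pos - 1).toNat = (pos - 1 - 1).toNat + 1 by omega, List.getElem?_cons_succ]
        rw [← PySem.List.pyGet?_of_nonneg _ (show (0:Int) ≤ pos - 1 - 1 by omega)]
        rw [ih (pos - 1) (s + 1) (by omega) h2']
        simp only [nthNZ, if_pos ha, if_neg hk]
        cases h : nthNZ l (pos - 1) <;> simp <;> ring

-- ===== VERDICT (by name: the statement is the Claim_ definition above) =====
theorem countBodies_spec : Claim_equal_countBodies := by
  intro l pos _ hpre
  unfold Spec_countBodies countBodies countBodies_alt
  by_cases hp : pos ≤ 0
  · rw [countBodiesLoop.eq_def]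
    simp [hp, show ¬ (0 : Int) < pos by omega]
  · have hc : pos ≤ (l.countP (fun v => v != 0) : Int) := by
      rcases hpre with h | h
      · omega
      · exact h
    have hA := loopA l pos l.length 0 0 0 (by simp) (by simpa using hc)
    simp only [Nat.cast_zero, List.drop_zero, sub_zero] at hA
    rw [hA]
    simp only [hp, if_false, show (0:Int) < pos by omega, if_true, zero_add]
    rw [idxsB l pos 0 (by omega) hc]
    cases h : nthNZ l pos <;> simp
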